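-- pv_equiv track=rewrite | github.com/Alberto-Beralix/Beralix | i386-squashfs-root/usr/share/software-center/softwarecenter/utils.py | htmlize_package_description
-- ===== SOURCE A (Python) =====
-- def normalize_package_description(desc):
--     """ this takes a package description and normalizes it
--         so that all uneeded \n are stripped away and all
--         enumerations are at the start of the line and start with a "*"
--         E.g.:
--         Some potentially very long paragrah that is in a single line.
--         A new paragrpah.
--         A list:
--         * item1
--         * item2 that may again be very very long
--     """
--
--     def get_indent(part, whitespace=" "):
--         i = 0
--         for i, char in enumerate(part):
--             if char != whitespace:
--                 break
--         return i
--
--     BULLETS = ('- ', '* ', 'o ')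
--     norm_description = ""
--     in_blist = False
--     # process it
--     for i, part in enumerate(desc.split("\n")):
--         indent = get_indent(part)
--         part = part.strip()
--
--         # explicit newline
--         if not part:
--             norm_description += '\n'
--             continue
--         # check if in a enumeration
--         if part[:2] in BULLETS:
--             in_blist = True
--             norm_description += "\n" + indent*' ' + "* " + part[2:]
--         elif in_blist and indent > 0:
--             norm_description += " " + part
--         elif part.endswith('.') or part.endswith(':'):
--             if in_blist:
--                 in_blist = False
--                 norm_description += '\n'
--             norm_description += part + '\n'
--         else:
--             in_blist = False
--             if not norm_description.endswith("\n"):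
--                 norm_description += " "
--             norm_description += part
--     return norm_description.strip()
--
-- def htmlize_package_description(desc):
--     html = ""
--     inside_li = False
--     for part in normalize_package_description(desc).split("\n"):
--         stripped_part = part.strip()
--         if not stripped_part: continue
--         if stripped_part.startswith("* "):
--             if not inside_li:
--                 html += "<ul>"
--                 inside_li = True
--             html += '<li>%s</li>' % stripped_part[2:]
--         else:
--             if inside_li:
--                 html += "</ul>"
--             html += '<p tabindex="0">%s</p>' % part
--             inside_li = False
--     if inside_li:
--         html += "</ul>"
--     return html
-- ===== SOURCE B (Python) =====
-- def normalize_package_description(desc):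
--     def get_indent(part, whitespace=" "):
--         i = 0
--         for i, char in enumerate(part):
--             if char != whitespace:
--                 break
--         return i
--
--     BULLETS = ('- ', '* ', 'o ')
--     norm_description = ""
--     in_blist = False
--     for i, part in enumerate(desc.split("\n")):
--         indent = get_indent(part)
--         part = part.strip()
--         if not part:
--             norm_description += '\n'
--             continue
--         if part[:2] in BULLETS:
--             in_blist = True
--             norm_description += "\n" + indent*' ' + "* " + part[2:]
--         elif in_blist and indent > 0:
--             norm_description += " " + part
--         elif part.endswith('.') or part.endswith(':'):
--             if in_blist:
--                 in_blist = False
--                 norm_description += '\n'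
--             norm_description += part + '\n'
--         else:
--             in_blist = False
--             if not norm_description.endswith("\n"):
--                 norm_description += " "
--             norm_description += part
--     return norm_description.strip()
--
-- def htmlize_package_description(desc):
--     # run-grouping: drop blank lines, then render maximal bullet runs as one <ul>
--     lines = [p for p in normalize_package_description(desc).split("\n") if p.strip()]
--     def render(lines):
--         if not lines:
--             return ""
--         if lines[0].strip().startswith("* "):
--             k = 0
--             while k < len(lines) and lines[k].strip().startswith("* "):
--                 k += 1
--             items = "".join('<li>%s</li>' % q.strip()[2:] for q in lines[:k])
--             return "<ul>" + items + "</ul>" + render(lines[k:])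
--         return '<p tabindex="0">%s</p>' % lines[0] + render(lines[1:])
--     return render(lines)
-- ===== Notes on version B (the rewrite author's own statement) =====
-- stated objective: idiomatic
-- what changed: htmlize's stateful inside_li flag loop is replaced by filtering out blank lines and recursively rendering maximal bullet runs (takeWhile/dropWhile grouping) as whole <ul> blocks; normalize_package_description is unchanged.
import Mathlib
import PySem

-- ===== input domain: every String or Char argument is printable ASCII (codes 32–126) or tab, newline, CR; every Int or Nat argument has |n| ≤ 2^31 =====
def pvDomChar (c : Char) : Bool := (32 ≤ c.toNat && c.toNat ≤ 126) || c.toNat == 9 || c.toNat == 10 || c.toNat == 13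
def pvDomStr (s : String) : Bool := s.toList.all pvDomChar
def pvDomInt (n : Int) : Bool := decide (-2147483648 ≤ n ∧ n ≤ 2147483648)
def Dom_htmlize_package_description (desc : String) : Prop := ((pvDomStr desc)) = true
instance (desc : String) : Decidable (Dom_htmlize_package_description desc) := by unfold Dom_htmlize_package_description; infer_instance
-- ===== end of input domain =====

-- B replaces A's inside_li state flag by grouping the nonblank lines into maximal bullet runs
-- (idiomatic run-grouping); normalize_package_description is unchanged and shared by both ports.

-- ===== PORT A =====
-- get_indent: Python's enumerate loop; the loop variable keeps its last value (len-1 when all spaces)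
def pvGetIndentGo (i : Nat) (c : Char) (rest : List Char) : Nat :=
  if c ≠ ' ' then i
  else match rest with
    | [] => i
    | d :: rs => pvGetIndentGo (i + 1) d rs

def pvGetIndent (cs : List Char) : Nat :=
  match cs with
  | [] => 0
  | c :: rest => pvGetIndentGo 0 c rest

-- one iteration of normalize_package_description's loop; state = (norm_description, in_blist)
def pvNormStep (st : List Char × Bool) (part0 : List Char) : List Char × Bool :=
  let indent := pvGetIndent part0
  let part := PySem.Chars.strip part0
  if part = [] then (st.1 ++ ['\n'], st.2)
  else if (PySem.List.slice part none (some 2) == "- ".toList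
        || PySem.List.slice part none (some 2) == "* ".toList
        || PySem.List.slice part none (some 2) == "o ".toList) then
    (st.1 ++ '\n' :: List.replicate indent ' ' ++ "* ".toList
          ++ PySem.List.slice part (some 2) none, true)
  else if st.2 && decide (0 < indent) then
    (st.1 ++ ' ' :: part, st.2)
  else if PySem.Chars.endswith part ['.'] || PySem.Chars.endswith part [':'] then
    ((if st.2 then st.1 ++ ['\n'] else st.1) ++ part ++ ['\n'], false)
  else
    ((if PySem.Chars.endswith st.1 ['\n'] then st.1 else st.1 ++ [' ']) ++ part, false)

def pvNormalize (desc : List Char) : List Char :=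
  PySem.Chars.strip ((PySem.Chars.splitOn desc ['\n']).foldl pvNormStep ([], false)).1

-- one iteration of htmlize's loop; state = (html, inside_li)
def pvHtmlAStep (st : List Char × Bool) (part : List Char) : List Char × Bool :=
  let sp := PySem.Chars.strip part
  if sp = [] then st
  else if PySem.Chars.startswith sp "* ".toList then
    ((if st.2 then st.1 else st.1 ++ "<ul>".toList)
       ++ "<li>".toList ++ PySem.List.slice sp (some 2) none ++ "</li>".toList, true)
  else
    ((if st.2 then st.1 ++ "</ul>".toList else st.1)
       ++ "<p tabindex=\"0\">".toList ++ part ++ "</p>".toList, false)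

-- closing "</ul>" after the loop when inside_li is still set
def pvFinish (st : List Char × Bool) : List Char :=
  if st.2 then st.1 ++ "</ul>".toList else st.1

def htmlize_package_description (desc : String) : String :=
  String.ofList (pvFinish ((PySem.Chars.splitOn (pvNormalize desc.toList) ['\n']).foldl pvHtmlAStep ([], false)))

-- ===== PORT B =====
def pvIsBullet (p : List Char) : Bool :=
  PySem.Chars.startswith (PySem.Chars.strip p) "* ".toList

def pvLiTag (q : List Char) : List Char :=
  "<li>".toList ++ PySem.List.slice (PySem.Chars.strip q) (some 2) none ++ "</li>".toList

-- render: recursion over maximal runs (takeWhile/dropWhile = Source B's k-scan and lines[k:])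
def pvRender : List (List Char) → List Char
  | [] => []
  | p :: rest =>
    if h : pvIsBullet p then
      "<ul>".toList ++ (((p :: rest).takeWhile pvIsBullet).map pvLiTag).flatten
        ++ "</ul>".toList ++ pvRender ((p :: rest).dropWhile pvIsBullet)
    else
      "<p tabindex=\"0\">".toList ++ p ++ "</p>".toList ++ pvRender rest
  termination_by l => l.length
  decreasing_by
  · simp [h]
    exact List.length_dropWhile_le _ _
  · simp

def htmlize_package_description_alt (desc : String) : String :=
  String.ofList (pvRender ((PySem.Chars.splitOn (pvNormalize desc.toList) ['\n']).filter
    (fun p => !(PySem.Chars.strip p).isEmpty)))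

-- ===== PRECONDITION & SPEC =====
def Spec_htmlize_package_description (desc : String) (out : String) : Prop := out = htmlize_package_description_alt desc
instance (desc : String) (out : String) : Decidable (Spec_htmlize_package_description desc out) := by unfold Spec_htmlize_package_description; infer_instance

-- ===== CLAIM (what is proved, stated in full; the proofs are below) =====
def Claim_equal_htmlize_package_description : Prop := ∀ (desc : String), Dom_htmlize_package_description desc → Spec_htmlize_package_description desc (htmlize_package_description desc)

-- ===== LEMMAS AND PROOFS =====

-- A's loop is the identity on lines whose strip is empty, so folding over the filtered list agrees
theorem pvFold_filter (ps : List (List Char)) (st : List Char × Bool) :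
    ps.foldl pvHtmlAStep st
      = (ps.filter (fun p => !(PySem.Chars.strip p).isEmpty)).foldl pvHtmlAStep st := by
  induction ps generalizing st with
  | nil => rfl
  | cons p rest ih =>
    by_cases h : PySem.Chars.strip p = []
    · simp [h, pvHtmlAStep, ih]
    · simp [h, ih]

-- main invariant: A's fold + closing tag equals B's run-grouped rendering
theorem pvMain (lines : List (List Char)) (hne : ∀ p ∈ lines, PySem.Chars.strip p ≠ []) :
    ∀ (h : List Char) (inLi : Bool),
      pvFinish (lines.foldl pvHtmlAStep (h, inLi))
      = if inLi then
          h ++ ((lines.takeWhile pvIsBullet).map pvLiTag).flatten ++ "</ul>".toList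
            ++ pvRender (lines.dropWhile pvIsBullet)
        else h ++ pvRender lines := by
  induction lines with
  | nil => intro h inLi; cases inLi <;> simp [pvRender, pvFinish]
  | cons p rest ih =>
    intro h inLi
    have hp : PySem.Chars.strip p ≠ [] := hne p (by simp)
    have hrest : ∀ q ∈ rest, PySem.Chars.strip q ≠ [] := fun q hq => hne q (by simp [hq])
    by_cases hb : pvIsBullet p
    · have hbs : PySem.Chars.startswith (PySem.Chars.strip p) "* ".toList = true := hb
      cases inLi with
      | true =>
        simp only [List.foldl_cons, pvHtmlAStep, if_neg hp, hbs]
        rw [ih hrest]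
        simp [hb, pvLiTag, List.append_assoc]
      | false =>
        simp only [List.foldl_cons, pvHtmlAStep, if_neg hp, hbs]
        rw [ih hrest]
        simp only [pvRender, dif_pos hb]
        simp [hb, pvLiTag, List.append_assoc]
    · have hbs : PySem.Chars.startswith (PySem.Chars.strip p) "* ".toList = false := by
        simpa [pvIsBullet] using hb
      cases inLi with
      | true =>
        simp only [List.foldl_cons, pvHtmlAStep, if_neg hp, hbs]
        rw [ih hrest]
        simp [hb, pvRender, List.append_assoc]
      | false =>
        simp only [List.foldl_cons, pvHtmlAStep, if_neg hp, hbs]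
        rw [ih hrest]
        simp [pvRender, hb, List.append_assoc]

-- ===== VERDICT (by name: the statement is the Claim_ definition above) =====
theorem htmlize_package_description_spec : Claim_equal_htmlize_package_description := by
  intro desc _
  unfold Spec_htmlize_package_description htmlize_package_description htmlize_package_description_alt
  rw [pvFold_filter]
  have := pvMain ((PySem.Chars.splitOn (pvNormalize desc.toList) ['\n']).filter
      (fun p => !(PySem.Chars.strip p).isEmpty))
    (by intro p hp
        have := List.of_mem_filter hp
        simpa [List.isEmpty_iff] using this)
    [] false
  rw [this]
  simp
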